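-- pv_equiv track=rewrite | github.com/Teeeeg/AlgorithmOA | OnSite/Aug13MS3.py | solution
-- ===== SOURCE A (Python) =====
-- def solution(A, X, Y):
--     n = len(A)
--     dist = (X - 1) * Y
--
--     res = (2 << 31) - 1
--
--     for left in range(0, n - dist):
--         right = left
--         total = 0
--         count = 0
--         while count < X:
--             total += A[right]
--             right += Y
--             count += 1
--         res = min(res, total)
--
--     return res
-- ===== SOURCE B (Python) =====
-- def solution(A, X, Y):
--     n = len(A)
--     dist = (X - 1) * Y
--     res = (2 << 31) - 1
--     # strided suffix sums: S[l] = A[l] + A[l+Y] + A[l+2Y] + ... while the index is in range;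
--     # S_at extends the table by 0 outside [0, n), the natural value of an empty suffix sum
--     S = [0] * n
--     def S_at(i):
--         return S[i] if 0 <= i < n else 0
--     for l in range(n - 1, -1, -1):
--         S[l] = A[l] + S_at(l + Y)
--     for left in range(0, n - dist):
--         res = min(res, S_at(left) - S_at(left + X * Y))
--     return res
-- ===== Notes on version B (the rewrite author's own statement) =====
-- stated objective: faster
-- what changed: B precomputes a strided suffix-sum table S (S[l] = A[l] + S_at(l+Y), 0 outside the list) in one backward pass and reads each window sum as S_at(left) - S_at(left + X*Y) in O(1), instead of A's inner while-loop that re-sums the X elements of every window.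
-- outside the precondition, e.g. on solution([5], 3, 0): A returns 15, B returns 0; on solution([3, 1, 2], 1, -1): A returns 1, B returns -2; on solution([1, 2], -1, 1): A returns 0, B returns -2
import Mathlib
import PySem

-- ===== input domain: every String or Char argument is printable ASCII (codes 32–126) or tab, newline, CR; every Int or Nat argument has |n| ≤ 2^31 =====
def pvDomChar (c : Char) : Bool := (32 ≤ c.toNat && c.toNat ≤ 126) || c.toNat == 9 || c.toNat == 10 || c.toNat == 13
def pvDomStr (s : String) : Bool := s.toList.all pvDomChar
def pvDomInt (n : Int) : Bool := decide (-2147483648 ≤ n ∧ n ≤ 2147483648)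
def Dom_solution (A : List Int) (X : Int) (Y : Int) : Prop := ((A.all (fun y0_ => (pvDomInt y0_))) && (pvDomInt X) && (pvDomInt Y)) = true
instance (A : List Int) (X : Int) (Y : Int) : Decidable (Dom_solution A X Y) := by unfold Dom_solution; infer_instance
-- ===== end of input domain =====

-- B replaces A's per-window inner summation with a precomputed strided suffix-sum table,
-- reading each window sum in O(1) (objective: faster, O(n) instead of O(n*X)).

-- ===== PORT A =====
-- the inner 'while count < X' loop: runs X.toNat times (0 times when X ≤ 0, as in Python);
-- A[right] is pyGetD (exact where Python's indexing succeeds, i.e. on Pre_solution)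
def solInner (A : List Int) (Y : Int) : Nat → Int → Int → Int
  | 0, _, total => total
  | f + 1, right, total => solInner A Y f (right + Y) (total + PySem.List.pyGetD A right 0)

def solution (A : List Int) (X : Int) (Y : Int) : Int :=
  let n : Int := A.length
  let dist : Int := (X - 1) * Y
  let res : Int := 4294967295  -- (2 << 31) - 1
  (PySem.List.pyRange 0 (n - dist) 1).foldl
    (fun res left => min res (solInner A Y X.toNat left 0)) res

-- ===== PORT B =====
-- B's helper S_at: the table value at i, or 0 outside [0, n) (empty suffix sum)
def sAt (S : List Int) (n : Int) (i : Int) : Int :=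
  if 0 ≤ i ∧ i < n then PySem.List.pyGetD S i 0 else 0

def solution_alt (A : List Int) (X : Int) (Y : Int) : Int :=
  let n : Int := A.length
  let dist : Int := (X - 1) * Y
  let res : Int := 4294967295  -- (2 << 31) - 1
  let S0 : List Int := List.replicate A.length 0
  let S : List Int := (PySem.List.pyRange (n - 1) (-1) (-1)).foldl
    (fun S l =>
      PySem.List.pySetD S l (PySem.List.pyGetD A l 0 + sAt S n (l + Y))) S0
  (PySem.List.pyRange 0 (n - dist) 1).foldl
    (fun res left => min res (sAt S n left - sAt S n (left + X * Y))) res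

-- ===== PRECONDITION & SPEC =====
-- Pre_ admits the task's natural domain (X ≥ 1, Y ≥ 1) plus the degenerate inputs where the
-- two programs still agree: X = 0 (every window sum is 0) and the window-free inputs
-- (len(A) ≤ (X-1)*Y, both return the untouched sentinel); the remaining X < 0, or
-- nonpositive-Y, inputs are excluded: A still returns there, but its values (zero-length
-- window sums counted as windows, zero stride, negative-index wraparound) are accidents of
-- its loop arithmetic that a strided suffix-sum implementation has no reason to reproduce.
def Pre_solution (A : List Int) (X : Int) (Y : Int) : Prop :=
  (1 ≤ X ∧ 1 ≤ Y) ∨ X = 0 ∨ (A.length : Int) ≤ (X - 1) * Y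
instance (A : List Int) (X : Int) (Y : Int) : Decidable (Pre_solution A X Y) := by
  unfold Pre_solution; infer_instance

def pvWitness_solution : List Int × Int × Int := ([1, 2, 3], 2, 1)

def Spec_solution (A : List Int) (X : Int) (Y : Int) (out : Int) : Prop := out = solution_alt A X Y
instance (A : List Int) (X : Int) (Y : Int) (out : Int) : Decidable (Spec_solution A X Y out) := by
  unfold Spec_solution; infer_instance

-- ===== CLAIM (what is proved, stated in full; the proofs are below) =====
def Claim_equal_solution : Prop := ∀ (A : List Int) (X : Int) (Y : Int),
  Dom_solution A X Y → Pre_solution A X Y → Spec_solution A X Y (solution A X Y)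

-- ===== LEMMAS AND PROOFS =====

-- ideal strided suffix sum: sfun A Ym1 l = A[l] + A[l + (Ym1+1)] + … while the index is in range
def sfun (A : List Int) (Ym1 : Nat) (l : Nat) : Int :=
  if _ : l < A.length then A.getD l 0 + sfun A Ym1 (l + (Ym1 + 1)) else 0
termination_by A.length - l
decreasing_by omega

theorem sfun_oor (A : List Int) (Ym1 : Nat) (l : Nat) (h : A.length ≤ l) :
    sfun A Ym1 l = 0 := by
  rw [sfun]; simp [Nat.not_lt.mpr h]

theorem sfun_step (A : List Int) (Ym1 : Nat) (l : Nat) (h : l < A.length) :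
    sfun A Ym1 l = A.getD l 0 + sfun A Ym1 (l + (Ym1 + 1)) := by
  rw [sfun]; simp [h]

-- the backward table-building loop computes sfun at every index
theorem buildS (A : List Int) (Y : Int) (hY : 1 ≤ Y) (m : Nat) (hm : m ≤ A.length)
    (S : List Int) (hlen : S.length = A.length)
    (hS : ∀ j : Nat, m ≤ j → j < A.length → S.getD j 0 = sfun A (Y.toNat - 1) j) :
    let S' := (PySem.List.pyRange ((m : Int) - 1) (-1) (-1)).foldl
      (fun S l =>
        PySem.List.pySetD S l
          (PySem.List.pyGetD A l 0 + sAt S (A.length : Int) (l + Y))) S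
    S'.length = A.length ∧ ∀ j : Nat, j < A.length → S'.getD j 0 = sfun A (Y.toNat - 1) j := by
  induction m generalizing S with
  | zero =>
    rw [show ((0 : Nat) : Int) - 1 = (-1 : Int) by norm_num,
        PySem.List.pyRange_neg_one_eq_nil (by omega), List.foldl_nil]
    exact ⟨hlen, fun j hj => hS j (Nat.zero_le j) hj⟩
  | succ m ih =>
    have hstep1 : ((m + 1 : Nat) : Int) - 1 = ((m : Nat) : Int) := by push_cast; omega
    have hcons : PySem.List.pyRange ((m : Nat) : Int) (-1) (-1)
        = ((m : Nat) : Int) :: PySem.List.pyRange ((((m : Nat) : Int)) - 1) (-1) (-1) := by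
      exact PySem.List.pyRange_neg_one_cons (by omega)
    rw [hstep1, hcons, List.foldl_cons]
    -- the updated table after writing index m
    set v : Int := PySem.List.pyGetD A ((m : Nat) : Int) 0 +
      sAt S (A.length : Int) (((m : Nat) : Int) + Y) with hv
    have hmn : m < A.length := by omega
    have hset : PySem.List.pySetD S ((m : Nat) : Int) v = S.set m v :=
      PySem.List.pySetD_natCast S m v
    rw [hset]
    have hlen1 : (S.set m v).length = A.length := by simp [hlen]
    -- the written value is sfun at m
    have hvm : v = sfun A (Y.toNat - 1) m := by
      have hYt : ((Y.toNat : Int)) = Y := Int.toNat_of_nonneg (by omega)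
      have hstep : m + (Y.toNat - 1 + 1) = m + Y.toNat := by omega
      rw [sfun_step A _ m hmn, hstep, hv]
      have hA : PySem.List.pyGetD A ((m : Nat) : Int) 0 = A.getD m 0 := by
        simp [PySem.List.pyGetD_natCast]
      rw [hA]
      congr 1
      unfold sAt
      by_cases hcase : ((m : Nat) : Int) + Y < (A.length : Int)
      · have hcast : ((m : Nat) : Int) + Y = ((m + Y.toNat : Nat) : Int) := by push_cast; omega
        have hlt : m + Y.toNat < A.length := by omega
        rw [if_pos ⟨by omega, hcase⟩, hcast]
        rw [PySem.List.pyGetD_natCast]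
        exact hS (m + Y.toNat) (by omega) hlt
      · rw [if_neg (fun hc => hcase hc.2), sfun_oor]
        omega
    exact ih (by omega) (S.set m v) hlen1 (by
      intro j hj hjn
      by_cases hjm : j = m
      · subst hjm
        rw [List.getD_eq_getElem?_getD, List.getElem?_set_self (by omega)]
        simpa using hvm
      · rw [List.getD_eq_getElem?_getD, List.getElem?_set_ne (by omega)]
        rw [← List.getD_eq_getElem?_getD]
        exact hS j (by omega) hjn)

-- A's inner while-loop is a difference of two strided suffix sums
theorem inner_eq (A : List Int) (Y : Int) (hY : 1 ≤ Y) (f : Nat) :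
    ∀ (l : Nat) (t : Int), (∀ k : Nat, k < f → l + k * Y.toNat < A.length) →
      solInner A Y f ((l : Nat) : Int) t
        = t + (sfun A (Y.toNat - 1) l - sfun A (Y.toNat - 1) (l + f * Y.toNat)) := by
  induction f with
  | zero => intro l t _; simp [solInner]
  | succ f ih =>
    intro l t h
    have hln : l < A.length := by have := h 0 (by omega); omega
    have hYt : ((Y.toNat : Int)) = Y := Int.toNat_of_nonneg (by omega)
    have hstep : ((l : Nat) : Int) + Y = ((l + Y.toNat : Nat) : Int) := by push_cast; omega
    have hA : PySem.List.pyGetD A ((l : Nat) : Int) 0 = A.getD l 0 := by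
      simp [PySem.List.pyGetD_natCast]
    show solInner A Y f (((l : Nat) : Int) + Y) (t + PySem.List.pyGetD A ((l : Nat) : Int) 0) = _
    rw [hstep, hA, ih (l + Y.toNat) (t + A.getD l 0)
        (fun k hk => by
          have h1 := h (k + 1) (by omega)
          have h2 : (k + 1) * Y.toNat = Y.toNat + k * Y.toNat := by ring
          omega)]
    rw [sfun_step A _ l hln]
    have h1 : l + Y.toNat + f * Y.toNat = l + (f + 1) * Y.toNat := by ring
    have h2 : l + (Y.toNat - 1 + 1) = l + Y.toNat := by omega
    rw [h1, h2]; ring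

theorem solution_eq_alt (A : List Int) (X : Int) (Y : Int)
    (hX : 1 ≤ X) (hY : 1 ≤ Y) : solution A X Y = solution_alt A X Y := by
  unfold solution solution_alt
  simp only []
  -- the built table
  set Ym1 := Y.toNat - 1 with hYm1
  have hlen0 : (List.replicate A.length (0 : Int)).length = A.length := by simp
  have hS0 : ∀ j : Nat, A.length ≤ j → j < A.length →
      (List.replicate A.length (0 : Int)).getD j 0 = sfun A Ym1 j := by
    intro j hj hjn; omega
  have hrange : ((A.length : Int) - 1) = ((A.length : Nat) : Int) - 1 := rfl
  have hB := buildS A Y hY A.length (le_refl _) (List.replicate A.length 0) hlen0 hS0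
  simp only [] at hB
  obtain ⟨hSlen, hSval⟩ := hB
  apply PySem.List.foldl_congr_mem
  intro res left hmem
  rw [PySem.List.mem_pyRange_one] at hmem
  obtain ⟨h0, hlt⟩ := hmem
  have hYt : ((Y.toNat : Int)) = Y := Int.toNat_of_nonneg (by omega)
  have hXt : ((X.toNat : Int)) = X := Int.toNat_of_nonneg (by omega)
  set l : Nat := left.toNat with hl
  have hleft : left = ((l : Nat) : Int) := by simp [hl, Int.toNat_of_nonneg h0]
  have hdist : (X - 1) * Y = (((X.toNat - 1) * Y.toNat : Nat) : Int) := by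
    rw [Nat.cast_mul]
    rw [show (((X.toNat - 1 : Nat)) : Int) = X - 1 by omega, hYt]
  rw [hdist] at hlt
  have hln : l < A.length := by
    have : (0 : Int) ≤ (((X.toNat - 1) * Y.toNat : Nat) : Int) := by positivity
    omega
  congr 1
  have hacc : ∀ k : Nat, k < X.toNat → l + k * Y.toNat < A.length := by
    intro k hk
    have hmul : k * Y.toNat ≤ (X.toNat - 1) * Y.toNat :=
      Nat.mul_le_mul_right _ (by omega)
    omega
  rw [hleft, inner_eq A Y hY X.toNat l 0 hacc]
  have ht : ((l : Nat) : Int) + X * Y = ((l + X.toNat * Y.toNat : Nat) : Int) := by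
    push_cast
    rw [hXt, hYt]
  rw [sAt, sAt]
  rw [ht, if_pos ⟨by omega, by exact_mod_cast hln⟩, PySem.List.pyGetD_natCast]
  rw [hSval l hln]
  by_cases hcase : ((l + X.toNat * Y.toNat : Nat) : Int) < (A.length : Int)
  · rw [if_pos ⟨by omega, hcase⟩, PySem.List.pyGetD_natCast, hSval _ (by exact_mod_cast hcase)]
    ring
  · rw [if_neg (fun hc => hcase hc.2), sfun_oor A (Y.toNat - 1) (l + X.toNat * Y.toNat) (by omega)]
    ring

-- with no window start (n - (X-1)*Y ≤ 0) both top-level loops are over an empty range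
theorem solution_eq_alt_sentinel (A : List Int) (X : Int) (Y : Int)
    (h : (A.length : Int) ≤ (X - 1) * Y) : solution A X Y = solution_alt A X Y := by
  unfold solution solution_alt
  simp only []
  rw [PySem.List.pyRange_one_eq_nil (by omega)]
  rfl

-- with X = 0 A's inner loop runs 0 times and B subtracts the table entry from itself
theorem solution_eq_alt_zero (A : List Int) (Y : Int) :
    solution A 0 Y = solution_alt A 0 Y := by
  unfold solution solution_alt
  simp only []
  apply PySem.List.foldl_congr_mem
  intro res left _
  have h1 : left + 0 * Y = left := by ring
  rw [h1, sub_self]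
  rfl

-- ===== VERDICT (by name: the statement is the Claim_ definition above) =====
theorem solution_spec : Claim_equal_solution := by
  intro A X Y _ hPre
  rcases hPre with ⟨hX, hY⟩ | hX0 | h
  · exact solution_eq_alt A X Y hX hY
  · subst hX0; exact solution_eq_alt_zero A Y
  · exact solution_eq_alt_sentinel A X Y h
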